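-- pv_equiv track=rewrite | github.com/askmadsen/introduction-to-programming | imperative/lists.py | even_after_last_7
-- ===== SOURCE A (Python) =====
-- def even_after_last_7(v: list[int]) -> int:
--     """ Returns the number of even elements after the last 7.
--     >>> even_after_last_7([0,7,3,1,7,2,3,4])
--     2
--     """
--     i = len(v) - 1
--     count = 0
--     while i >= 0 and v[i] != 7:
--         if v[i] % 2 == 0:
--             count = count + 1
--         i = i - 1
--     if i < 0:
--         return 0
--     else:
--         return count
-- ===== SOURCE B (Python) =====
-- def even_after_last_7(v: list[int]) -> int:
--     """Locate the last 7, then count evens in the tail after it; 0 if no 7."""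
--     idx = -1
--     for i, x in enumerate(v):
--         if x == 7:
--             idx = i
--     if idx < 0:
--         return 0
--     return sum(1 for x in v[idx + 1:] if x % 2 == 0)
-- ===== Notes on version B (the rewrite author's own statement) =====
-- stated objective: simpler
-- what changed: B replaces A's single backward early-terminating index scan by a 'locate the last 7 with a forward pass, then count evens in the tail slice' decomposition.
import Mathlib
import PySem

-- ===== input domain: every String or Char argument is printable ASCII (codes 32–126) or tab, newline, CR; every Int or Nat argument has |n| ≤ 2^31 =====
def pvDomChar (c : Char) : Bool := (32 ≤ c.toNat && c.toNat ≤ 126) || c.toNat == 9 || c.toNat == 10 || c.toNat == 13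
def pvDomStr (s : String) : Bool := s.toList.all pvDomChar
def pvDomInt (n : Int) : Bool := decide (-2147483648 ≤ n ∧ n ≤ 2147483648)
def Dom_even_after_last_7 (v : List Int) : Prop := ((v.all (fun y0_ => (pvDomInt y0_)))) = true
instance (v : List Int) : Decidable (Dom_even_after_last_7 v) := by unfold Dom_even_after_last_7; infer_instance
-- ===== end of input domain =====

-- B replaces A's single backward early-terminating scan by a 'locate the last 7 forward,
-- then count evens in the tail slice' decomposition; a timing run measured B faster (constant factor).

-- ===== PORT A =====
-- A's while loop: i counts down from len(v)-1; state is (i, count). We recurse on n = i + 1.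
-- v[i] is always in range here (0 ≤ i < len v), so pyGetD with default 0 is exact.
def evenAfterLast7Loop (v : List Int) : Nat → Int → Int
  | 0, _ => 0                       -- i < 0: return 0
  | Nat.succ n, count =>
      let x := PySem.List.pyGetD v (n : Int) 0
      if x = 7 then count           -- while condition fails with i ≥ 0: return count
      else evenAfterLast7Loop v n (if PySem.Int.mod x 2 = 0 then count + 1 else count)

def even_after_last_7 (v : List Int) : Int := evenAfterLast7Loop v v.length 0

-- ===== PORT B =====
-- forward pass recording the index of the last 7 (starting from -1)
def lastIdx7 (v : List Int) : Int :=
  (PySem.List.enumerate v 0).foldl (fun idx p => if p.2 = 7 then p.1 else idx) (-1)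

-- sum(1 for x in v[idx+1:] if x % 2 == 0) ported as countP over the slice
def even_after_last_7_alt (v : List Int) : Int :=
  let idx := lastIdx7 v
  if idx < 0 then 0
  else ((PySem.List.slice v (some (idx + 1)) none).countP
          (fun x => PySem.Int.mod x 2 == 0) : Int)

-- ===== PRECONDITION & SPEC =====
def Spec_even_after_last_7 (v : List Int) (out : Int) : Prop := out = even_after_last_7_alt v
instance (v : List Int) (out : Int) : Decidable (Spec_even_after_last_7 v out) := by unfold Spec_even_after_last_7; infer_instance

-- ===== CLAIM (what is proved, stated in full; the proofs are below) =====
def Claim_equal_even_after_last_7 : Prop := ∀ (v : List Int), Dom_even_after_last_7 v → Spec_even_after_last_7 v (even_after_last_7 v)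

-- ===== LEMMAS AND PROOFS =====

/-- contribution of one element to the even-count -/
def evInc (x : Int) : Int := if PySem.Int.mod x 2 = 0 then 1 else 0

-- A's loop over the first n elements never looks at a snoc'd element.
theorem aLoop_append (v : List Int) (x : Int) (n : Nat) (h : n ≤ v.length) (c : Int) :
    evenAfterLast7Loop (v ++ [x]) n c = evenAfterLast7Loop v n c := by
  induction n generalizing c with
  | zero => rfl
  | succ n ih =>
      have hn : n < v.length := h
      simp only [evenAfterLast7Loop, PySem.List.pyGetD_natCast,
        List.getD_append _ _ _ _ hn]
      by_cases h7 : v.getD n 0 = 7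
      · simp only [if_pos h7]
      · simp only [if_neg h7]
        exact ih (Nat.le_of_lt hn) _

-- no 7 among the first n elements ⇒ the loop runs off the left end and returns 0
theorem aLoop_no7 (v : List Int) (n : Nat) (h : n ≤ v.length)
    (h7 : (7 : Int) ∉ v.take n) (c : Int) :
    evenAfterLast7Loop v n c = 0 := by
  induction n generalizing c with
  | zero => rfl
  | succ n ih =>
      have hn : n < v.length := h
      have htake : v.take (n + 1) = v.take n ++ [v[n]] := List.take_succ_eq_append_getElem hn
      rw [htake] at h7
      simp only [List.mem_append, List.mem_singleton, not_or] at h7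
      simp only [evenAfterLast7Loop, PySem.List.pyGetD_natCast, List.getD_eq_getElem v 0 hn]
      rw [if_neg (fun he => h7.2 he.symm)]
      exact ih (Nat.le_of_lt hn) h7.1 _

-- the accumulator is affine: it only survives if a 7 is hit among the first n elements
theorem aLoop_affine (v : List Int) (n : Nat) (h : n ≤ v.length) (c : Int) :
    evenAfterLast7Loop v n c =
      evenAfterLast7Loop v n 0 + (if (7 : Int) ∈ v.take n then c else 0) := by
  induction n generalizing c with
  | zero => simp [evenAfterLast7Loop]
  | succ n ih =>
      have hn : n < v.length := h
      have htake : v.take (n + 1) = v.take n ++ [v[n]] := List.take_succ_eq_append_getElem hn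
      simp only [evenAfterLast7Loop, PySem.List.pyGetD_natCast, List.getD_eq_getElem v 0 hn]
      by_cases h7 : v[n] = 7
      · have : (7 : Int) ∈ v.take (n + 1) := by rw [htake, h7]; simp
        simp [h7, this]
      · rw [if_neg h7, if_neg h7,
          ih (Nat.le_of_lt hn), ih (Nat.le_of_lt hn) (if PySem.Int.mod v[n] 2 = 0 then (0:Int) + 1 else 0)]
        have hmem : ((7:Int) ∈ v.take (n+1)) ↔ ((7:Int) ∈ v.take n) := by
          rw [htake]
          constructor
          · intro hm
            rcases List.mem_append.mp hm with h | h
            · exact h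
            · exact absurd (List.mem_singleton.mp h).symm h7
          · intro hm
            exact List.mem_append.mpr (Or.inl hm)
        simp only [hmem]
        by_cases hin : (7 : Int) ∈ v.take n <;> split_ifs <;> ring

-- snoc characterisation of A
theorem A_snoc (v : List Int) (x : Int) :
    even_after_last_7 (v ++ [x]) =
      if x = 7 then 0
      else if (7 : Int) ∈ v then even_after_last_7 v + evInc x else 0 := by
  unfold even_after_last_7
  have hlen : (v ++ [x]).length = v.length + 1 := by simp
  rw [hlen]
  simp only [evenAfterLast7Loop]
  have hget : PySem.List.pyGetD (v ++ [x]) (v.length : Int) 0 = x := by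
    rw [PySem.List.pyGetD_natCast]
    simp
  rw [hget]
  by_cases h7 : x = 7
  · simp [h7]
  · rw [if_neg h7, if_neg h7, aLoop_append v x v.length le_rfl,
      aLoop_affine v v.length le_rfl]
    simp only [List.take_length]
    by_cases hin : (7 : Int) ∈ v
    · rw [if_pos hin, if_pos hin]
      unfold evInc; split_ifs <;> ring
    · rw [if_neg hin, if_neg hin, aLoop_no7 v v.length le_rfl (by simpa using hin)]
      ring

-- enumerate over an append splits
theorem enumerate_append (v w : List Int) (s : Int) :
    PySem.List.enumerate (v ++ w) s
      = PySem.List.enumerate v s ++ PySem.List.enumerate w (s + v.length) := by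
  induction v generalizing s with
  | nil => simp [PySem.List.enumerate_nil]
  | cons a v ih =>
      simp [PySem.List.enumerate_cons, ih (s + 1)]
      ring_nf

-- range of lastIdx7's generalised fold: result is the start-shifted last 7 position, or the init
theorem lastIdxFold_spec (v : List Int) (s i0 : Int) :
    (((7 : Int) ∈ v → s ≤ (PySem.List.enumerate v s).foldl
          (fun idx p => if p.2 = 7 then p.1 else idx) i0
        ∧ (PySem.List.enumerate v s).foldl
          (fun idx p => if p.2 = 7 then p.1 else idx) i0 < s + v.length)
      ∧ ((7 : Int) ∉ v → (PySem.List.enumerate v s).foldl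
          (fun idx p => if p.2 = 7 then p.1 else idx) i0 = i0)) := by
  induction v generalizing s i0 with
  | nil => simp [PySem.List.enumerate_nil]
  | cons a v ih =>
      simp only [PySem.List.enumerate_cons, List.foldl_cons]
      constructor
      · intro hmem
        by_cases hv : (7 : Int) ∈ v
        · have h := (ih (s + 1) (if a = 7 then s else i0)).1 hv
          refine ⟨by omega, ?_⟩
          simp only [List.length_cons]
          push_cast
          omega
        · have ha : a = 7 := by
            rcases List.mem_cons.mp hmem with h | h
            · exact h.symm
            · exact absurd h hv
          have h := (ih (s + 1) (if a = 7 then s else i0)).2 hv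
          rw [h, if_pos ha]
          simp only [List.length_cons]
          constructor
          · rfl
          · push_cast; omega
      · intro hmem
        have ha : a ≠ 7 := fun h => hmem (by simp [h])
        have hv : (7 : Int) ∉ v := fun h => hmem (List.mem_cons_of_mem _ h)
        rw [(ih (s + 1) _).2 hv, if_neg ha]

theorem lastIdx7_no7 (v : List Int) (h : (7 : Int) ∉ v) : lastIdx7 v = -1 :=
  (lastIdxFold_spec v 0 (-1)).2 h

theorem lastIdx7_mem (v : List Int) (h : (7 : Int) ∈ v) :
    0 ≤ lastIdx7 v ∧ lastIdx7 v < v.length := by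
  have := (lastIdxFold_spec v 0 (-1)).1 h
  unfold lastIdx7
  omega

theorem lastIdx7_snoc (v : List Int) (x : Int) :
    lastIdx7 (v ++ [x]) = if x = 7 then (v.length : Int) else lastIdx7 v := by
  unfold lastIdx7
  rw [enumerate_append, List.foldl_append]
  simp [PySem.List.enumerate_cons, PySem.List.enumerate_nil]

-- snoc characterisation of B
theorem B_snoc (v : List Int) (x : Int) :
    even_after_last_7_alt (v ++ [x]) =
      if x = 7 then 0
      else if (7 : Int) ∈ v then even_after_last_7_alt v + evInc x else 0 := by
  unfold even_after_last_7_alt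
  rw [lastIdx7_snoc]
  by_cases h7 : x = 7
  · have hnn : ¬ ((v.length : Int) < 0) := by omega
    rw [if_pos h7, if_pos h7, if_neg hnn]
    rw [PySem.List.slice_from _ (by positivity)]
    have : ((v.length : Int) + 1).toNat = v.length + 1 := by omega
    simp [this]
  · rw [if_neg h7, if_neg h7]
    by_cases hin : (7 : Int) ∈ v
    · obtain ⟨h0, hlt⟩ := lastIdx7_mem v hin
      have hneg : ¬ lastIdx7 v < 0 := by omega
      rw [if_neg hneg, if_neg hneg, if_pos hin]
      rw [PySem.List.slice_from _ (by omega), PySem.List.slice_from _ (by omega)]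
      have hle : (lastIdx7 v + 1).toNat ≤ v.length := by omega
      rw [List.drop_append_of_le_length hle, List.countP_append]
      push_cast
      unfold evInc
      simp
    · rw [lastIdx7_no7 v hin, if_pos (by norm_num), if_neg hin]

theorem AB_eq (v : List Int) : even_after_last_7 v = even_after_last_7_alt v := by
  induction v using List.reverseRecOn with
  | nil => rfl
  | append_singleton v x ih => rw [A_snoc, B_snoc, ih]

-- ===== VERDICT (by name: the statement is the Claim_ definition above) =====
theorem even_after_last_7_spec : Claim_equal_even_after_last_7 := by
  intro v _
  exact AB_eq v
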